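-- pv_equiv track=rewrite | github.com/JoshuaRuiter/Pinning-Sympy | calculate_root_spaces.py | generate_variable_names
-- ===== SOURCE A (Python) =====
-- from itertools import product
--
-- def generate_variable_names(name_string, upper_bound, dimensions):
--     # generate a list of variable name strings
--     # For example, generate_variable_names("A",3,2)
--     # generates the list of strings ["A11","A12","A13","A21","A22","A23","A13","A23","A33"]
--     variable_names = ''
--     list_of_tuples = list(product(range(1,upper_bound+1),repeat=dimensions))
--     for t in list_of_tuples:
--         variable_names = variable_names + name_string
--         for i in t:
--             variable_names = variable_names + str(i)
--         variable_names = variable_names + ' '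
--     return variable_names[0:-1]
-- ===== SOURCE B (Python) =====
-- def generate_variable_names(name_string, upper_bound, dimensions):
--     if dimensions < 0:
--         raise ValueError("dimensions must be non-negative")
--     results = [name_string]
--     for _ in range(dimensions):
--         results = [prefix + str(i) for prefix in results for i in range(1, upper_bound + 1)]
--     return ' '.join(results)
-- ===== Notes on version B (the rewrite author's own statement) =====
-- stated objective: alternative
-- what changed: B builds the names incrementally (repeatedly extending a list of partial strings by one digit position) and joins with ' ', instead of materializing the full list of index tuples with itertools.product and concatenating into one string that is finally sliced.
import Mathlib
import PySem

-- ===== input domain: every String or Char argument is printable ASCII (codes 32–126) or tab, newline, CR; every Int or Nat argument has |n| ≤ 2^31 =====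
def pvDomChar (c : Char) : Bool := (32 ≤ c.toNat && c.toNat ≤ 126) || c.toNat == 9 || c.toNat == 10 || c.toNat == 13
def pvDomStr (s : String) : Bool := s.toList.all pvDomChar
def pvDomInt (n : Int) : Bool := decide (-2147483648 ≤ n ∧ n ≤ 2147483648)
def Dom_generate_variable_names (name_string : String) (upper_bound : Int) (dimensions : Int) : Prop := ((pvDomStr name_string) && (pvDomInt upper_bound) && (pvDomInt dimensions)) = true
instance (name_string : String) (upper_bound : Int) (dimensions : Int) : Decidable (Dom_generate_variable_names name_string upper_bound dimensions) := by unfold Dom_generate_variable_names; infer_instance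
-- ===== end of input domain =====

-- B replaces the tuple enumeration by incremental extension of partial name strings; same cost, different structure (objective: alternative).

-- ===== PORT A =====
-- itertools.product(xs, repeat=n): tuples in lexicographic order, last position varying fastest.
-- The pool is a thunk because CPython's product never materializes its iterables when repeat = 0,
-- and it yields nothing at once when a pool is empty; the accumulator recursion is tail-recursive.
def pyProductStep (xs : Unit → List Int) (acc : List (List Int)) : List (List Int) :=
  acc.flatMap (fun t => (xs ()).map (fun x => t ++ [x]))

def pyProductRepeatAux (xs : Unit → List Int) : Nat → List (List Int) → List (List Int)
  | 0, acc => acc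
  | n + 1, acc => pyProductRepeatAux xs n (pyProductStep xs acc)

def pyProductRepeat (xs : Unit → List Int) (n : Nat) : List (List Int) :=
  if n ≠ 0 ∧ xs () = [] then [] else pyProductRepeatAux xs n [[]]

def generate_variable_names (name_string : String) (upper_bound : Int) (dimensions : Int) : String :=
  -- dimensions.toNat: Pre_ guarantees 0 ≤ dimensions (Python raises ValueError otherwise)
  let list_of_tuples := pyProductRepeat (fun _ => PySem.List.pyRange 1 (upper_bound + 1) 1) dimensions.toNat
  let variable_names := list_of_tuples.foldl
    (fun vn t => (t.foldl (fun a i => a ++ PySem.Int.toStr i) (vn ++ name_string)) ++ " ") ""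
  PySem.Str.slice variable_names (some 0) (some (-1))

-- ===== PORT B =====
-- B raises ValueError on dimensions < 0 (outside Pre_); under Pre_ the loop runs dimensions times
def altStep (upper_bound : Int) (results : List String) : List String :=
  results.flatMap (fun p => (PySem.List.pyRange 1 (upper_bound + 1) 1).map (fun i => p ++ PySem.Int.toStr i))

def generate_variable_names_alt (name_string : String) (upper_bound : Int) (dimensions : Int) : String :=
  PySem.Str.join " "
    ((PySem.List.pyRange 0 dimensions 1).foldl (fun results _ => altStep upper_bound results) [name_string])

-- ===== PRECONDITION & SPEC =====
-- A raises ValueError when dimensions < 0 (itertools.product rejects a negative repeat), and B raises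
-- ValueError there too; Pre_ excludes exactly those inputs.
def Pre_generate_variable_names (_name_string : String) (_upper_bound : Int) (dimensions : Int) : Prop :=
  0 ≤ dimensions
instance (name_string : String) (upper_bound : Int) (dimensions : Int) : Decidable (Pre_generate_variable_names name_string upper_bound dimensions) := by unfold Pre_generate_variable_names; infer_instance

def pvWitness_generate_variable_names : String × Int × Int := ("A", 3, 2)

def Spec_generate_variable_names (name_string : String) (upper_bound : Int) (dimensions : Int) (out : String) : Prop := out = generate_variable_names_alt name_string upper_bound dimensions
instance (name_string : String) (upper_bound : Int) (dimensions : Int) (out : String) : Decidable (Spec_generate_variable_names name_string upper_bound dimensions out) := by unfold Spec_generate_variable_names; infer_instance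

-- ===== CLAIM (what is proved, stated in full; the proofs are below) =====
def Claim_equal_generate_variable_names : Prop := ∀ (name_string : String) (upper_bound : Int) (dimensions : Int), Dom_generate_variable_names name_string upper_bound dimensions → Pre_generate_variable_names name_string upper_bound dimensions → Spec_generate_variable_names name_string upper_bound dimensions (generate_variable_names name_string upper_bound dimensions)

-- ===== LEMMAS AND PROOFS =====

-- a foldl that ignores the list elements is function iteration
theorem foldl_const_iterate {α β : Type} (g : β → β) (l : List α) (init : β) :
    l.foldl (fun b _ => g b) init = g^[l.length] init := by
  induction l generalizing init with
  | nil => rfl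
  | cons x xs ih => simp [List.foldl_cons, ih, Function.iterate_succ_apply]

-- inner fold of A: appending digits distributes over the seed
theorem foldl_toStr_append (t : List Int) (s : String) :
    t.foldl (fun a i => a ++ PySem.Int.toStr i) s =
      s ++ t.foldl (fun a i => a ++ PySem.Int.toStr i) "" := by
  induction t generalizing s with
  | nil => simp
  | cons x xs ih =>
      simp only [List.foldl_cons]
      rw [ih (s ++ PySem.Int.toStr x), ih ("" ++ PySem.Int.toStr x)]
      simp [String.append_assoc]

-- the tail-recursive accumulator loop is iteration of the step
theorem aux_iterate (xs : Unit → List Int) (n : Nat) (acc : List (List Int)) :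
    pyProductRepeatAux xs n acc = (pyProductStep xs)^[n] acc := by
  induction n generalizing acc with
  | zero => rfl
  | succ n ih => rw [pyProductRepeatAux, ih, Function.iterate_succ_apply]

-- the short-circuit for an empty pool agrees with the iteration
theorem pyProductRepeat_iterate (xs : Unit → List Int) (n : Nat) :
    pyProductRepeat xs n = (pyProductStep xs)^[n] [[]] := by
  unfold pyProductRepeat
  split
  · next h =>
      obtain ⟨hn, hxs⟩ := h
      obtain ⟨m, rfl⟩ := Nat.exists_eq_succ_of_ne_zero hn
      have hstep : pyProductStep xs [[]] = [] := by simp [pyProductStep, hxs]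
      have hnil : ∀ k, (pyProductStep xs)^[k] ([] : List (List Int)) = [] := by
        intro k
        induction k with
        | zero => rfl
        | succ k ihk =>
            rw [Function.iterate_succ_apply, show pyProductStep xs [] = [] from rfl, ihk]
      rw [Function.iterate_succ_apply, hstep, hnil]
  · exact aux_iterate xs n [[]]

-- B's iterated step produces exactly the rendered product tuples, in order
theorem iterate_altStep (name : String) (ub : Int) (n : Nat) :
    (altStep ub)^[n] [name] =
      ((pyProductStep (fun _ => PySem.List.pyRange 1 (ub + 1) 1))^[n] [[]]).map
        (fun t => name ++ t.foldl (fun a i => a ++ PySem.Int.toStr i) "") := by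
  induction n with
  | zero => simp
  | succ n ih =>
      rw [Function.iterate_succ_apply', Function.iterate_succ_apply', ih]
      simp only [pyProductStep, altStep, List.flatMap_map, List.map_flatMap, List.map_map]
      apply List.flatMap_congr
      intro t _
      apply List.map_congr_left
      intro x _
      simp only [Function.comp_apply, List.foldl_append, List.foldl_cons, List.foldl_nil]
      simp [String.append_assoc]

-- outer fold of A rewritten as the fold over the rendered strings
theorem foldl_outer_map (name : String) (l : List (List Int)) (acc : String) :
    l.foldl (fun vn t => (t.foldl (fun a i => a ++ PySem.Int.toStr i) (vn ++ name)) ++ " ") acc =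
      (l.map (fun t => name ++ t.foldl (fun a i => a ++ PySem.Int.toStr i) "")).foldl
        (fun a s => (a ++ s) ++ " ") acc := by
  rw [List.foldl_map]
  apply List.foldl_ext
  intro a t _
  rw [foldl_toStr_append t (a ++ name)]
  simp [String.append_assoc]

-- the trailing-space fold distributes over its accumulator
theorem foldl_space_shift (l : List (List Char)) (acc : List Char) :
    l.foldl (fun a s => a ++ s ++ [' ']) acc =
      acc ++ l.foldl (fun a s => a ++ s ++ [' ']) [] := by
  induction l generalizing acc with
  | nil => simp
  | cons q r ihr =>
      simp only [List.foldl_cons]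
      rw [ihr (acc ++ q ++ [' ']), ihr ([] ++ q ++ [' '])]
      simp

-- on char lists: the concat-with-trailing-space fold is join plus a trailing space
theorem foldl_chars_space (parts : List (List Char)) :
    parts.foldl (fun a s => a ++ s ++ [' ']) [] =
      PySem.Chars.join [' '] parts ++ (if parts = [] then [] else [' ']) := by
  induction parts with
  | nil => simp [PySem.Chars.join_nil]
  | cons p rest ih =>
      simp only [List.foldl_cons, List.nil_append]
      rw [foldl_space_shift rest (p ++ [' '])]
      cases rest with
      | nil => simp [PySem.Chars.join_singleton]
      | cons q r =>
          rw [ih]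
          simp [PySem.Chars.join_cons_cons]

-- A's string fold, viewed on char lists
theorem toList_foldl_space (l : List String) :
    (l.foldl (fun a s => (a ++ s) ++ " ") "").toList =
      (l.map String.toList).foldl (fun a s => a ++ s ++ [' ']) [] := by
  induction l using List.reverseRecOn with
  | nil => rfl
  | append_singleton xs x ih => simp [String.toList_append, ih]

-- dropping the final space of A's concatenation gives the ' '-join of the same strings
theorem slice_fold_eq_join (l : List String) :
    PySem.Str.slice (l.foldl (fun a s => (a ++ s) ++ " ") "") (some 0) (some (-1)) =
      PySem.Str.join " " l := by
  apply String.toList_inj.mp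
  rw [PySem.Str.toList_join]
  have h0 : (PySem.Str.slice (l.foldl (fun a s => (a ++ s) ++ " ") "") (some 0) (some (-1))).toList
      = (l.foldl (fun a s => (a ++ s) ++ " ") "").toList.dropLast := by
    simp [PySem.Str.toList_slice, PySem.List.slice_zero_start, PySem.List.slice_to_neg_one]
  rw [h0, toList_foldl_space, foldl_chars_space]
  cases hl : l.map String.toList with
  | nil => simp [PySem.Chars.join_nil]
  | cons p rest => simp

-- ===== VERDICT (by name: the statement is the Claim_ definition above) =====
theorem generate_variable_names_spec : Claim_equal_generate_variable_names := by
  intro name ub d _ hpre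
  unfold Spec_generate_variable_names generate_variable_names generate_variable_names_alt
  dsimp only
  have hlen : (PySem.List.pyRange 0 d 1).length = d.toNat := by
    rw [PySem.List.length_pyRange_one]; omega
  rw [foldl_const_iterate (altStep ub) (PySem.List.pyRange 0 d 1) [name], hlen,
    iterate_altStep name ub d.toNat, ← pyProductRepeat_iterate, foldl_outer_map name _ "",
    slice_fold_eq_join]
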